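-- pv_equiv track=rewrite | github.com/ashinzekene/bioinformatics | 3-comparing-genes-proteins-and-genomes/week_2/overlap_alignment.py | OverlapAlignment
-- ===== SOURCE A (Python) =====
-- def OverlapAlignment(a, b, ru):
--     la = len(a)
--     lb = len(b)
--
--     scores_matrix = [[0] * (lb+1) for i in range(la+1)]
--     backtrack = [[0] * (lb+1) for i in range(la+1)]
--     for i in range(1, la+1):
--         scores_matrix[i][0] = 0
--         backtrack[i][0] = a[i-1]
--     for j in range(1, lb+1):
--         scores_matrix[0][j] = 0
--         backtrack[0][j] = b[j-1]
--
--     for i in range(1, len(scores_matrix)):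
--         for j in range(1, len(scores_matrix[0])):
--             symbol_a = a[i-1]
--             symbol_b = b[j-1]
--             match = -2
--             if symbol_a == symbol_b:
--                 match = 1
--             insertion = scores_matrix[i-1][j] - ru
--             deletion = scores_matrix[i][j-1] - ru
--             match_mismatch = scores_matrix[i-1][j-1] + match
--
--             scores_matrix[i][j] = max(insertion, deletion, match_mismatch)
--
--             if scores_matrix[i][j] == insertion:
--                 backtrack[i][j] = "|"
--             elif scores_matrix[i][j] == deletion:
--                 backtrack[i][j] = "-"
--             elif scores_matrix[i][j] == match_mismatch:
--                 backtrack[i][j] = "+"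
--
--     max_val = scores_matrix[0][-1]
--     max_index = 0
--     for j in range(lb+1):
--         if scores_matrix[-1][j] >= max_val:
--             max_val = scores_matrix[-1][j]
--             max_index = j
--
--
--     result_a = ""
--     result_b = ""
--     i, j = la, max_index
--     while i > 0 and j > 0:
--         if backtrack[i][j] == "0":
--             return max_val, result_a, result_b
--         if backtrack[i][j] == "+":
--             result_a = a[i-1] + result_a
--             result_b = b[j-1] + result_b
--             i-=1
--             j-=1
--         elif backtrack[i][j] == "|":
--             result_a = a[i-1] + result_a
--             result_b = "-" + result_b
--             i-=1
--         elif backtrack[i][j] == "-":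
--             result_a = "-" + result_a
--             result_b = b[j-1] + result_b
--             j-=1
--
--     return max_val, result_a, result_b
-- ===== SOURCE B (Python) =====
-- def OverlapAlignment(a, b, ru):
--     # Forward DP that carries the alignment strings along with each score:
--     # no backtrack matrix and no traceback phase at all. Each cell holds
--     # (score, aligned_a, aligned_b); ties resolved with the same priority
--     # (insertion, then deletion, then match/mismatch) and the final cell is
--     # the last maximum of the bottom row (>= scan), as in the original.
--     lb = len(b)
--     row = [(0, "", "")] * (lb + 1)
--     for ca in a:
--         new = [(0, "", "")]
--         for j in range(1, lb + 1):
--             cb = b[j - 1]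
--             up = row[j]
--             left = new[j - 1]
--             diag = row[j - 1]
--             ins = up[0] - ru
--             dele = left[0] - ru
--             mm = diag[0] + (1 if ca == cb else -2)
--             best = max(ins, dele, mm)
--             if best == ins:
--                 cell = (best, up[1] + ca, up[2] + "-")
--             elif best == dele:
--                 cell = (best, left[1] + "-", left[2] + cb)
--             else:
--                 cell = (best, diag[1] + ca, diag[2] + cb)
--             new.append(cell)
--         row = new
--     val, ra, rb = 0, "", ""
--     for s, x, y in row:
--         if s >= val:
--             val, ra, rb = s, x, y
--     return val, ra, rb
-- ===== Notes on version B (the rewrite author's own statement) =====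
-- stated objective: alternative
-- what changed: B eliminates the backtrack matrix and the whole traceback phase: a forward DP carries (score, aligned_a, aligned_b) in each cell (one row kept at a time), resolving ties in A's insertion/deletion/match priority, and the answer is read directly from the last-maximum cell of the bottom row.
import Mathlib
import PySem

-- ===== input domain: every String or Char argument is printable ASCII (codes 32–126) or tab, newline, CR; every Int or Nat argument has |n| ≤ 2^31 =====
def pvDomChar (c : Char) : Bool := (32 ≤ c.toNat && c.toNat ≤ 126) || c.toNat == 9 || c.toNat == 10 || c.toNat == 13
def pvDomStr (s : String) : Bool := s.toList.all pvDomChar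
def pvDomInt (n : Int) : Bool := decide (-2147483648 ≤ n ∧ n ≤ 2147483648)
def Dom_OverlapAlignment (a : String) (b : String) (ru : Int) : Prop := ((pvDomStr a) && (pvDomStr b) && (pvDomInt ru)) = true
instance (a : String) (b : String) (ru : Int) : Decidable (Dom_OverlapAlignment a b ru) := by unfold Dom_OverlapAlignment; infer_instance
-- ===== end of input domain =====

-- B eliminates the backtrack matrix and the whole traceback phase: the forward DP carries
-- (score, aligned_a, aligned_b) per cell, one row at a time; objective: alternative.

-- ===== PORT A =====
-- Python's scores_matrix/backtrack are (la+1)x(lb+1) lists of lists; every index A reads or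
-- writes is in range, so they are modeled exactly by total maps with pointwise update.
def pvUpd2 (m : Nat → Nat → Int) (i j : Nat) (v : Int) : Nat → Nat → Int :=
  fun i' j' => if i' = i ∧ j' = j then v else m i' j'

def pvUpd2S (m : Nat → Nat → String) (i j : Nat) (v : String) : Nat → Nat → String :=
  fun i' j' => if i' = i ∧ j' = j then v else m i' j'

-- body of A's inner 'for j in range(1, lb+1)' loop (j = l+1)
def pvFillBodyA (al bl : List Char) (ru : Int) (i : Nat)
    (q : (Nat → Nat → Int) × (Nat → Nat → String)) (l : Nat) :
    (Nat → Nat → Int) × (Nat → Nat → String) :=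
  let j := l + 1
  let symbol_a := al.getD (i-1) ' '
  let symbol_b := bl.getD (j-1) ' '
  let mtch : Int := if symbol_a = symbol_b then 1 else -2
  let insertion := q.1 (i-1) j - ru
  let deletion := q.1 i (j-1) - ru
  let match_mismatch := q.1 (i-1) (j-1) + mtch
  let v := max insertion (max deletion match_mismatch)
  let c := if v = insertion then "|"
           else if v = deletion then "-"
           else if v = match_mismatch then "+"
           else q.2 i j   -- Python: no branch fires, cell left unchanged (unreachable)
  (pvUpd2 q.1 i j v, pvUpd2S q.2 i j c)

-- body of A's outer 'for i in range(1, la+1)' loop (i = k+1)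
def pvFillRowA (al bl : List Char) (ru : Int) (lb : Nat)
    (p : (Nat → Nat → Int) × (Nat → Nat → String)) (k : Nat) :
    (Nat → Nat → Int) × (Nat → Nat → String) :=
  (List.range lb).foldl (pvFillBodyA al bl ru (k+1)) p

-- body of A's 'for i in range(1, la+1)' border loop
def pvBorderA1 (al : List Char) (p : (Nat → Nat → Int) × (Nat → Nat → String)) (k : Nat) :
    (Nat → Nat → Int) × (Nat → Nat → String) :=
  let i := k + 1
  (pvUpd2 p.1 i 0 0, pvUpd2S p.2 i 0 (String.mk [al.getD (i-1) ' ']))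

-- body of A's 'for j in range(1, lb+1)' border loop
def pvBorderA2 (bl : List Char) (p : (Nat → Nat → Int) × (Nat → Nat → String)) (k : Nat) :
    (Nat → Nat → Int) × (Nat → Nat → String) :=
  let j := k + 1
  (pvUpd2 p.1 0 j 0, pvUpd2S p.2 0 j (String.mk [bl.getD (j-1) ' ']))

-- A's final-row scan: 'if scores_matrix[-1][j] >= max_val' ([-1] is row la)
def pvScanStep (scores : Nat → Nat → Int) (la : Nat) (p : Int × Nat) (j : Nat) : Int × Nat :=
  if scores la j ≥ p.1 then (scores la j, j) else p

-- A's while loop; result strings built by prepending, exactly as the Python does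
def pvTbA (al bl : List Char) (back : Nat → Nat → String) (i j : Nat)
    (ra rb : List Char) : List Char × List Char :=
  if h : 0 < i ∧ 0 < j then
    let c := back i j
    if c = "0" then (ra, rb)
    else if c = "+" then
      pvTbA al bl back (i-1) (j-1) (al.getD (i-1) ' ' :: ra) (bl.getD (j-1) ' ' :: rb)
    else if c = "|" then
      pvTbA al bl back (i-1) j (al.getD (i-1) ' ' :: ra) ('-' :: rb)
    else if c = "-" then
      pvTbA al bl back i (j-1) ('-' :: ra) (bl.getD (j-1) ' ' :: rb)
    else (ra, rb)   -- Python would loop forever here; unreachable (interior cells are "|","-","+")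
  else (ra, rb)
termination_by i + j
decreasing_by all_goals omega

def OverlapAlignment (a : String) (b : String) (ru : Int) : Int × String × String :=
  let al := a.toList
  let bl := b.toList
  let la := al.length
  let lb := bl.length
  let scores0 : Nat → Nat → Int := fun _ _ => 0
  let back0 : Nat → Nat → String := fun _ _ => "INT0"  -- Python int 0: equal to none of "0","+","|","-"
  -- for i in range(1, la+1): scores_matrix[i][0] = 0; backtrack[i][0] = a[i-1]
  let sb1 := (List.range la).foldl (pvBorderA1 al) (scores0, back0)
  -- for j in range(1, lb+1): scores_matrix[0][j] = 0; backtrack[0][j] = b[j-1]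
  let sb2 := (List.range lb).foldl (pvBorderA2 bl) sb1
  -- the main double loop
  let sb := (List.range la).foldl (pvFillRowA al bl ru lb) sb2
  -- max_val = scores_matrix[0][-1]; then scan row [-1] (= row la) with >=
  let mi := (List.range (lb+1)).foldl (pvScanStep sb.1 la) (sb.1 0 lb, 0)
  let res := pvTbA al bl sb.2 la mi.2 [] []
  (mi.1, String.mk res.1, String.mk res.2)

-- ===== PORT B =====
-- Source B's inner loop body: a cell of the new row, (score, aligned_a, aligned_b) (j = l+1);
-- Python str modeled as List Char, string concatenation as ++
def pvCellB (bl : List Char) (ru : Int) (ca : Char)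
    (row : List (Int × List Char × List Char))
    (new : List (Int × List Char × List Char)) (l : Nat) :
    List (Int × List Char × List Char) :=
  let j := l + 1
  let cb := bl.getD (j-1) ' '
  let up := row.getD j (0, [], [])
  let left := new.getD (j-1) (0, [], [])
  let diag := row.getD (j-1) (0, [], [])
  let ins := up.1 - ru
  let dele := left.1 - ru
  let mm := diag.1 + (if ca = cb then 1 else -2)
  let best := max ins (max dele mm)
  let cell := if best = ins then (best, up.2.1 ++ [ca], up.2.2 ++ ['-'])
    else if best = dele then (best, left.2.1 ++ ['-'], left.2.2 ++ [cb])
    else (best, diag.2.1 ++ [ca], diag.2.2 ++ [cb])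
  new ++ [cell]

-- Source B's outer 'for ca in a' loop body: build the next row from the current one
def pvRowB (bl : List Char) (ru : Int) (lb : Nat)
    (row : List (Int × List Char × List Char)) (ca : Char) :
    List (Int × List Char × List Char) :=
  (List.range lb).foldl (pvCellB bl ru ca row) [(0, [], [])]

-- Source B's final '>=' scan over the last row (last maximum wins)
def pvPickB (st c : Int × List Char × List Char) : Int × List Char × List Char :=
  if c.1 ≥ st.1 then c else st

def OverlapAlignment_alt (a : String) (b : String) (ru : Int) : Int × String × String :=
  let al := a.toList
  let bl := b.toList
  let lb := bl.length
  let row := al.foldl (pvRowB bl ru lb) (List.replicate (lb+1) (0, [], []))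
  let fin := row.foldl pvPickB (0, [], [])
  (fin.1, String.mk fin.2.1, String.mk fin.2.2)

-- ===== PRECONDITION & SPEC =====
def Spec_OverlapAlignment (a : String) (b : String) (ru : Int) (out : Int × String × String) : Prop := out = OverlapAlignment_alt a b ru
instance (a : String) (b : String) (ru : Int) (out : Int × String × String) : Decidable (Spec_OverlapAlignment a b ru out) := by unfold Spec_OverlapAlignment; infer_instance

-- ===== CLAIM (what is proved, stated in full; the proofs are below) =====
def Claim_equal_OverlapAlignment : Prop := ∀ (a : String) (b : String) (ru : Int), Dom_OverlapAlignment a b ru → Spec_OverlapAlignment a b ru (OverlapAlignment a b ru)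

-- ===== LEMMAS AND PROOFS =====

-- the overlap-alignment DP recurrence both programs compute
def pvS (al bl : List Char) (ru : Int) : Nat → Nat → Int
  | 0, _ => 0
  | _+1, 0 => 0
  | i+1, j+1 =>
      max (pvS al bl ru i (j+1) - ru)
        (max (pvS al bl ru (i+1) j - ru)
          (pvS al bl ru i j + (if al.getD i ' ' = bl.getD j ' ' then 1 else -2)))
termination_by i j => i + j

-- A's backtrack cell, characterized through the score recurrence
def pvBT (al bl : List Char) (ru : Int) (i j : Nat) : String :=
  if pvS al bl ru i j = pvS al bl ru (i-1) j - ru then "|"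
  else if pvS al bl ru i j = pvS al bl ru i (j-1) - ru then "-"
  else "+"

-- the alignment pair at cell (i,j), following A's tie-break priority
def pvAl (al bl : List Char) (ru : Int) : Nat → Nat → List Char × List Char
  | 0, _ => ([], [])
  | _+1, 0 => ([], [])
  | i+1, j+1 =>
      if pvS al bl ru (i+1) (j+1) = pvS al bl ru i (j+1) - ru then
        ((pvAl al bl ru i (j+1)).1 ++ [al.getD i ' '], (pvAl al bl ru i (j+1)).2 ++ ['-'])
      else if pvS al bl ru (i+1) (j+1) = pvS al bl ru (i+1) j - ru then
        ((pvAl al bl ru (i+1) j).1 ++ ['-'], (pvAl al bl ru (i+1) j).2 ++ [bl.getD j ' '])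
      else
        ((pvAl al bl ru i j).1 ++ [al.getD i ' '], (pvAl al bl ru i j).2 ++ [bl.getD j ' '])
termination_by i j => i + j

-- ---------- generic helpers ----------
theorem pv_foldl_range_succ {α : Type} (f : α → Nat → α) (init : α) (n : Nat) :
    (List.range (n+1)).foldl f init = f ((List.range n).foldl f init) n := by
  rw [List.range_succ, List.foldl_append, List.foldl_cons, List.foldl_nil]

theorem pv_getD_map_range {α : Type} (f : Nat → α) (d : α) (n j : Nat) (hj : j < n) :
    ((List.range n).map f).getD j d = f j := by
  rw [List.getD_eq_getElem _ _ (by simpa using hj)]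
  simp

-- ---------- the DP recurrence ----------
theorem pvS_zero_left (al bl : List Char) (ru : Int) (j : Nat) : pvS al bl ru 0 j = 0 := by
  cases j <;> simp [pvS]

theorem pvS_zero_right (al bl : List Char) (ru : Int) (i : Nat) : pvS al bl ru i 0 = 0 := by
  cases i <;> simp [pvS]

theorem pvS_succ (al bl : List Char) (ru : Int) (i j : Nat) :
    pvS al bl ru (i+1) (j+1) =
      max (pvS al bl ru i (j+1) - ru)
        (max (pvS al bl ru (i+1) j - ru)
          (pvS al bl ru i j + (if al.getD i ' ' = bl.getD j ' ' then 1 else -2))) := by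
  rw [pvS]

theorem pvAl_zero_left (al bl : List Char) (ru : Int) (j : Nat) : pvAl al bl ru 0 j = ([], []) := by
  cases j <;> simp [pvAl]

theorem pvAl_zero_right (al bl : List Char) (ru : Int) (i : Nat) : pvAl al bl ru i 0 = ([], []) := by
  cases i <;> simp [pvAl]

theorem pvAl_succ (al bl : List Char) (ru : Int) (i j : Nat) :
    pvAl al bl ru (i+1) (j+1) =
      if pvS al bl ru (i+1) (j+1) = pvS al bl ru i (j+1) - ru then
        ((pvAl al bl ru i (j+1)).1 ++ [al.getD i ' '], (pvAl al bl ru i (j+1)).2 ++ ['-'])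
      else if pvS al bl ru (i+1) (j+1) = pvS al bl ru (i+1) j - ru then
        ((pvAl al bl ru (i+1) j).1 ++ ['-'], (pvAl al bl ru (i+1) j).2 ++ [bl.getD j ' '])
      else
        ((pvAl al bl ru i j).1 ++ [al.getD i ' '], (pvAl al bl ru i j).2 ++ [bl.getD j ' ']) := by
  rw [pvAl]

-- ---------- A-side fill invariant ----------
def pvGoodS (al bl : List Char) (ru : Int) (lb r c : Nat) (s : Nat → Nat → Int) : Prop :=
  ∀ i' j', j' ≤ lb → s i' j' = if i' < r ∨ (i' = r ∧ j' ≤ c) then pvS al bl ru i' j' else 0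

def pvGoodB (al bl : List Char) (ru : Int) (lb r c : Nat) (bk : Nat → Nat → String) : Prop :=
  ∀ i' j', 1 ≤ i' → 1 ≤ j' → j' ≤ lb → (i' < r ∨ (i' = r ∧ j' ≤ c)) →
    bk i' j' = pvBT al bl ru i' j'

theorem pvGoodS_row_step (al bl : List Char) (ru : Int) (lb r : Nat) (s : Nat → Nat → Int)
    (h : pvGoodS al bl ru lb r lb s) : pvGoodS al bl ru lb (r+1) 0 s := by
  intro i' j' hj
  rw [h i' j' hj]
  by_cases h1 : i' < r ∨ (i' = r ∧ j' ≤ lb)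
  · rw [if_pos h1, if_pos (show i' < r+1 ∨ (i' = r+1 ∧ j' ≤ 0) by omega)]
  · by_cases h3 : i' = r+1 ∧ j' ≤ 0
    · obtain ⟨rfl, hj0⟩ := h3
      have hz : j' = 0 := by omega
      subst hz
      rw [if_neg h1, if_pos (by omega), pvS_zero_right]
    · rw [if_neg h1, if_neg (by omega)]

theorem pvGoodB_row_step (al bl : List Char) (ru : Int) (lb r : Nat) (bk : Nat → Nat → String)
    (h : pvGoodB al bl ru lb r lb bk) : pvGoodB al bl ru lb (r+1) 0 bk := by
  intro i' j' h1 h2 h3 hr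
  exact h i' j' h1 h2 h3 (by omega)

theorem pv_max3_eq (x y z : Int) (h1 : max x (max y z) ≠ x) (h2 : max x (max y z) ≠ y) :
    max x (max y z) = z := by
  rcases max_choice x (max y z) with h | h
  · exact absurd h h1
  · rcases max_choice y z with h' | h'
    · rw [h, h'] at h2; exact absurd rfl h2
    · rw [h, h']

theorem pvFillBodyA_inv (al bl : List Char) (ru : Int) (lb i l : Nat) (hi : 1 ≤ i) (hl : l < lb)
    (q : (Nat → Nat → Int) × (Nat → Nat → String))
    (hs : pvGoodS al bl ru lb i l q.1) (hb : pvGoodB al bl ru lb i l q.2) :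
    pvGoodS al bl ru lb i (l+1) (pvFillBodyA al bl ru i q l).1 ∧
    pvGoodB al bl ru lb i (l+1) (pvFillBodyA al bl ru i q l).2 := by
  have r1 : q.1 (i-1) (l+1) = pvS al bl ru (i-1) (l+1) := by
    rw [hs _ _ (by omega)]; exact if_pos (by omega)
  have r2 : q.1 i l = pvS al bl ru i l := by
    rw [hs _ _ (by omega)]; exact if_pos (by omega)
  have r3 : q.1 (i-1) l = pvS al bl ru (i-1) l := by
    rw [hs _ _ (by omega)]; exact if_pos (by omega)
  have hv : max (pvS al bl ru (i-1) (l+1) - ru)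
      (max (pvS al bl ru i l - ru)
        (pvS al bl ru (i-1) l + (if al.getD (i-1) ' ' = bl.getD l ' ' then 1 else -2)))
      = pvS al bl ru i (l+1) := by
    obtain ⟨i0, rfl⟩ : ∃ i0, i = i0 + 1 := ⟨i - 1, by omega⟩
    simp only [Nat.add_sub_cancel]
    rw [pvS_succ]
  constructor
  · intro i' j' hj'
    simp only [pvFillBodyA, pvUpd2, Nat.add_sub_cancel, r1, r2, r3, hv]
    by_cases hc : i' = i ∧ j' = l + 1
    · obtain ⟨rfl, rfl⟩ := hc
      rw [if_pos ⟨rfl, rfl⟩, if_pos (by omega)]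
    · rw [if_neg hc, hs i' j' hj']
      by_cases hr : i' < i ∨ (i' = i ∧ j' ≤ l)
      · rw [if_pos hr, if_pos (by omega)]
      · rw [if_neg hr, if_neg (by omega)]
  · intro i' j' h1 h2 h3 hr
    simp only [pvFillBodyA, pvUpd2S, Nat.add_sub_cancel, r1, r2, r3, hv]
    by_cases hc : i' = i ∧ j' = l + 1
    · obtain ⟨rfl, rfl⟩ := hc
      rw [if_pos ⟨rfl, rfl⟩]
      unfold pvBT
      simp only [Nat.add_sub_cancel]
      by_cases c1 : pvS al bl ru i' (l+1) = pvS al bl ru (i'-1) (l+1) - ru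
      · rw [if_pos c1, if_pos c1]
      · rw [if_neg c1, if_neg c1]
        by_cases c2 : pvS al bl ru i' (l+1) = pvS al bl ru i' l - ru
        · rw [if_pos c2, if_pos c2]
        · rw [if_neg c2, if_neg c2]
          have hmm : pvS al bl ru i' (l+1) =
              pvS al bl ru (i'-1) l + (if al.getD (i'-1) ' ' = bl.getD l ' ' then 1 else -2) := by
            rw [← hv]
            exact pv_max3_eq _ _ _ (by rw [hv]; exact c1) (by rw [hv]; exact c2)
          rw [if_pos hmm]
    · rw [if_neg hc]
      exact hb i' j' h1 h2 h3 (by omega)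

theorem pvFillRowA_inv (al bl : List Char) (ru : Int) (lb i : Nat) (hi : 1 ≤ i)
    (p : (Nat → Nat → Int) × (Nat → Nat → String))
    (hs : pvGoodS al bl ru lb i 0 p.1) (hb : pvGoodB al bl ru lb i 0 p.2) :
    ∀ n, n ≤ lb →
      pvGoodS al bl ru lb i n (((List.range n).foldl (pvFillBodyA al bl ru i) p).1) ∧
      pvGoodB al bl ru lb i n (((List.range n).foldl (pvFillBodyA al bl ru i) p).2) := by
  intro n
  induction n with
  | zero => intro _; simpa using ⟨hs, hb⟩
  | succ m ih =>
    intro hm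
    rw [pv_foldl_range_succ]
    obtain ⟨h1, h2⟩ := ih (by omega)
    exact pvFillBodyA_inv al bl ru lb i m hi (by omega) _ h1 h2

theorem pvFillA_inv (al bl : List Char) (ru : Int) (lb : Nat)
    (p0 : (Nat → Nat → Int) × (Nat → Nat → String)) (hs0 : ∀ i j, p0.1 i j = 0) :
    ∀ k, pvGoodS al bl ru lb k lb (((List.range k).foldl (pvFillRowA al bl ru lb) p0).1) ∧
      pvGoodB al bl ru lb k lb (((List.range k).foldl (pvFillRowA al bl ru lb) p0).2) := by
  intro k
  induction k with
  | zero =>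
    simp only [List.range_zero, List.foldl_nil]
    constructor
    · intro i' j' hj
      rw [hs0]
      by_cases h1 : i' < 0 ∨ (i' = 0 ∧ j' ≤ lb)
      · rw [if_pos h1]
        have : i' = 0 := by omega
        subst this; rw [pvS_zero_left]
      · rw [if_neg h1]
    · intro i' j' h1 _ _ hr; omega
  | succ m ih =>
    rw [pv_foldl_range_succ]
    obtain ⟨h1, h2⟩ := ih
    unfold pvFillRowA
    exact pvFillRowA_inv al bl ru lb (m+1) (by omega) _
      (pvGoodS_row_step al bl ru lb m _ h1) (pvGoodB_row_step al bl ru lb m _ h2) lb (le_refl _)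

-- border loops write only zeros into the score matrix
theorem pvBorderA1_zero (al : List Char) (n : Nat)
    (p : (Nat → Nat → Int) × (Nat → Nat → String)) (h : ∀ i j, p.1 i j = 0) :
    ∀ i j, ((List.range n).foldl (pvBorderA1 al) p).1 i j = 0 := by
  induction n generalizing p with
  | zero => simpa using h
  | succ m ih =>
    intro i j
    rw [pv_foldl_range_succ]
    simp only [pvBorderA1, pvUpd2]
    split
    · rfl
    · exact ih p h i j

theorem pvBorderA2_zero (bl : List Char) (n : Nat)
    (p : (Nat → Nat → Int) × (Nat → Nat → String)) (h : ∀ i j, p.1 i j = 0) :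
    ∀ i j, ((List.range n).foldl (pvBorderA2 bl) p).1 i j = 0 := by
  induction n generalizing p with
  | zero => simpa using h
  | succ m ih =>
    intro i j
    rw [pv_foldl_range_succ]
    simp only [pvBorderA2, pvUpd2]
    split
    · rfl
    · exact ih p h i j

-- ---------- A's traceback computes pvAl ----------
theorem pvTbA_eq_pvAl (al bl : List Char) (ru : Int) (back : Nat → Nat → String) (la lb : Nat)
    (hb : ∀ i j, 1 ≤ i → i ≤ la → 1 ≤ j → j ≤ lb → back i j = pvBT al bl ru i j) :
    ∀ n i j, i + j ≤ n → i ≤ la → j ≤ lb → ∀ (ra rb : List Char),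
      pvTbA al bl back i j ra rb = ((pvAl al bl ru i j).1 ++ ra, (pvAl al bl ru i j).2 ++ rb) := by
  intro n
  induction n with
  | zero =>
    intro i j hn hi hj ra rb
    have hi0 : i = 0 := by omega
    have hj0 : j = 0 := by omega
    subst hi0; subst hj0
    rw [pvTbA]
    simp [pvAl_zero_left]
  | succ m ih =>
    intro i j hn hi hj ra rb
    by_cases hij : 0 < i ∧ 0 < j
    · obtain ⟨i0, rfl⟩ : ∃ i0, i = i0 + 1 := ⟨i - 1, by omega⟩
      obtain ⟨j0, rfl⟩ : ∃ j0, j = j0 + 1 := ⟨j - 1, by omega⟩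
      have hbij : back (i0+1) (j0+1) = pvBT al bl ru (i0+1) (j0+1) :=
        hb _ _ (by omega) hi (by omega) hj
      rw [pvTbA, dif_pos hij]
      simp only [hbij]
      rw [pvAl_succ]
      unfold pvBT
      simp only [Nat.add_sub_cancel]
      by_cases c1 : pvS al bl ru (i0+1) (j0+1) = pvS al bl ru i0 (j0+1) - ru
      · rw [if_pos c1, if_pos c1]
        have h0 : ¬ (("|":String) = "0") := by decide
        have h2 : ¬ (("|":String) = "+") := by decide
        rw [if_neg h0, if_neg h2, if_pos rfl]
        rw [ih i0 (j0+1) (by omega) (by omega) hj]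
        simp [List.append_assoc]
      · rw [if_neg c1, if_neg c1]
        by_cases c2 : pvS al bl ru (i0+1) (j0+1) = pvS al bl ru (i0+1) j0 - ru
        · rw [if_pos c2, if_pos c2]
          have h0 : ¬ (("-":String) = "0") := by decide
          have h2 : ¬ (("-":String) = "+") := by decide
          have h3 : ¬ (("-":String) = "|") := by decide
          rw [if_neg h0, if_neg h2, if_neg h3, if_pos rfl]
          rw [ih (i0+1) j0 (by omega) hi (by omega)]
          simp [List.append_assoc]
        · rw [if_neg c2, if_neg c2]
          have h0 : ¬ (("+":String) = "0") := by decide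
          rw [if_neg h0, if_pos rfl]
          rw [ih i0 j0 (by omega) (by omega) (by omega)]
          simp [List.append_assoc]
    · rw [pvTbA, dif_neg hij]
      have : i = 0 ∨ j = 0 := by omega
      rcases this with rfl | rfl
      · simp [pvAl_zero_left]
      · simp [pvAl_zero_right]

-- ---------- B-side fill ----------
def pvRowSpec (al bl : List Char) (ru : Int) (lb i : Nat) : List (Int × List Char × List Char) :=
  (List.range (lb+1)).map (fun j => (pvS al bl ru i j, pvAl al bl ru i j))

theorem pvCellB_fold (al bl : List Char) (ru : Int) (lb i : Nat) :
    ∀ n, n ≤ lb →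
      (List.range n).foldl (pvCellB bl ru (al.getD i ' ') (pvRowSpec al bl ru lb i)) [(0, [], [])]
        = (List.range (n+1)).map (fun j => (pvS al bl ru (i+1) j, pvAl al bl ru (i+1) j)) := by
  intro n
  induction n with
  | zero =>
    intro _
    simp [List.range_one, pvS_zero_right, pvAl_zero_right]
  | succ m ih =>
    intro hm
    rw [pv_foldl_range_succ, ih (by omega)]
    simp only [pvCellB, Nat.add_sub_cancel]
    rw [pv_getD_map_range _ _ _ _ (show m < m+1 by omega)]
    have hup : (pvRowSpec al bl ru lb i).getD (m+1) (0, [], [])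
        = (pvS al bl ru i (m+1), pvAl al bl ru i (m+1)) := by
      unfold pvRowSpec; exact pv_getD_map_range _ _ _ _ (by omega)
    have hdiag : (pvRowSpec al bl ru lb i).getD m (0, [], [])
        = (pvS al bl ru i m, pvAl al bl ru i m) := by
      unfold pvRowSpec; exact pv_getD_map_range _ _ _ _ (by omega)
    simp only [hup, hdiag]
    have hbest : max (pvS al bl ru i (m+1) - ru)
        (max (pvS al bl ru (i+1) m - ru)
          (pvS al bl ru i m + (if al.getD i ' ' = bl.getD m ' ' then 1 else -2)))
        = pvS al bl ru (i+1) (m+1) := (pvS_succ al bl ru i m).symm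
    have hcell : (if (max (pvS al bl ru i (m+1) - ru)
          (max (pvS al bl ru (i+1) m - ru)
            (pvS al bl ru i m + (if al.getD i ' ' = bl.getD m ' ' then 1 else -2))))
            = pvS al bl ru i (m+1) - ru then
        (max (pvS al bl ru i (m+1) - ru)
          (max (pvS al bl ru (i+1) m - ru)
            (pvS al bl ru i m + (if al.getD i ' ' = bl.getD m ' ' then 1 else -2))),
          (pvAl al bl ru i (m+1)).1 ++ [al.getD i ' '], (pvAl al bl ru i (m+1)).2 ++ ['-'])
      else if (max (pvS al bl ru i (m+1) - ru)
          (max (pvS al bl ru (i+1) m - ru)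
            (pvS al bl ru i m + (if al.getD i ' ' = bl.getD m ' ' then 1 else -2))))
            = pvS al bl ru (i+1) m - ru then
        (max (pvS al bl ru i (m+1) - ru)
          (max (pvS al bl ru (i+1) m - ru)
            (pvS al bl ru i m + (if al.getD i ' ' = bl.getD m ' ' then 1 else -2))),
          (pvAl al bl ru (i+1) m).1 ++ ['-'], (pvAl al bl ru (i+1) m).2 ++ [bl.getD m ' '])
      else
        (max (pvS al bl ru i (m+1) - ru)
          (max (pvS al bl ru (i+1) m - ru)
            (pvS al bl ru i m + (if al.getD i ' ' = bl.getD m ' ' then 1 else -2))),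
          (pvAl al bl ru i m).1 ++ [al.getD i ' '], (pvAl al bl ru i m).2 ++ [bl.getD m ' ']))
        = (pvS al bl ru (i+1) (m+1), pvAl al bl ru (i+1) (m+1)) := by
      rw [hbest, pvAl_succ]
      by_cases c1 : pvS al bl ru (i+1) (m+1) = pvS al bl ru i (m+1) - ru
      · rw [if_pos c1, if_pos c1]
      · rw [if_neg c1, if_neg c1]
        by_cases c2 : pvS al bl ru (i+1) (m+1) = pvS al bl ru (i+1) m - ru
        · rw [if_pos c2, if_pos c2]
        · rw [if_neg c2, if_neg c2]
    rw [hcell]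
    conv_rhs => rw [List.range_succ, List.map_append]
    simp

theorem pvRowB_spec (al bl : List Char) (ru : Int) (lb i : Nat) :
    pvRowB bl ru lb (pvRowSpec al bl ru lb i) (al.getD i ' ') = pvRowSpec al bl ru lb (i+1) := by
  unfold pvRowB pvRowSpec
  exact pvCellB_fold al bl ru lb i lb (le_refl _)

theorem pvRowsB (al bl : List Char) (ru : Int) (lb : Nat) :
    ∀ i, i ≤ al.length →
      (al.take i).foldl (pvRowB bl ru lb) (List.replicate (lb+1) (0, [], []))
        = pvRowSpec al bl ru lb i := by
  have h0 : List.replicate (lb+1) ((0:Int), ([]:List Char), ([]:List Char))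
      = pvRowSpec al bl ru lb 0 := by
    unfold pvRowSpec
    apply List.ext_getElem (by simp)
    intro n h1 h2
    simp [pvS_zero_left, pvAl_zero_left]
  intro i
  induction i with
  | zero => intro _; simpa using h0
  | succ m ih =>
    intro hm
    have hget : al[m]? = some (al[m]'(by omega)) := List.getElem?_eq_getElem (by omega)
    rw [List.take_succ, hget, List.foldl_append, ih (by omega)]
    simp only [Option.toList_some, List.foldl_cons, List.foldl_nil]
    have : al[m]'(by omega) = al.getD m ' ' := (List.getD_eq_getElem al ' ' (by omega)).symm
    rw [this, pvRowB_spec]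

-- ---------- the two '>=' scans pick the same cell ----------
theorem pvScanB_eq (al bl : List Char) (ru : Int) (s : Nat → Nat → Int) (la lb : Nat)
    (hs : ∀ j, j ≤ lb → s la j = pvS al bl ru la j) :
    ∀ n, n ≤ lb+1 →
      ((pvRowSpec al bl ru lb la).take n).foldl pvPickB (0, [], [])
        = (((List.range n).foldl (pvScanStep s la) (0, 0)).1,
            pvAl al bl ru la (((List.range n).foldl (pvScanStep s la) (0, 0)).2)) ∧
      ((List.range n).foldl (pvScanStep s la) (0, 0)).1
        = pvS al bl ru la (((List.range n).foldl (pvScanStep s la) (0, 0)).2) ∧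
      ((List.range n).foldl (pvScanStep s la) (0, 0)).2 ≤ lb := by
  intro n
  induction n with
  | zero =>
    intro _
    simp [pvAl_zero_right, pvS_zero_right]
  | succ m ih =>
    intro hm
    obtain ⟨ih1, ih2, ih3⟩ := ih (by omega)
    have hlen : m < (pvRowSpec al bl ru lb la).length := by
      unfold pvRowSpec; simp; omega
    have hgetm : (pvRowSpec al bl ru lb la)[m]'hlen
        = (pvS al bl ru la m, pvAl al bl ru la m) := by
      unfold pvRowSpec
      simp
    rw [List.take_succ, List.getElem?_eq_getElem hlen, pv_foldl_range_succ]
    simp only [Option.toList_some, List.foldl_append, List.foldl_cons, List.foldl_nil]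
    rw [ih1, hgetm]
    simp only [pvScanStep, pvPickB]
    rw [hs m (by omega)]
    by_cases hc : pvS al bl ru la m ≥ ((List.range m).foldl (pvScanStep s la) (0, 0)).1
    · rw [if_pos hc, if_pos hc]
      exact ⟨rfl, rfl, by omega⟩
    · rw [if_neg hc, if_neg hc]
      exact ⟨ih1.symm ▸ rfl, ih2, ih3⟩

-- ===== VERDICT (by name: the statement is the Claim_ definition above) =====
theorem OverlapAlignment_spec : Claim_equal_OverlapAlignment := by
  intro a b ru _
  unfold Spec_OverlapAlignment OverlapAlignment OverlapAlignment_alt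
  simp only []
  generalize a.toList = al
  generalize b.toList = bl
  set la := al.length with hla
  set lb := bl.length with hlb
  set SB := (List.range la).foldl (pvFillRowA al bl ru lb)
    ((List.range lb).foldl (pvBorderA2 bl)
      ((List.range la).foldl (pvBorderA1 al) (fun _ _ => (0:Int), fun _ _ => "INT0"))) with hSB
  have hz : ∀ i j, ((List.range lb).foldl (pvBorderA2 bl)
      ((List.range la).foldl (pvBorderA1 al) (fun _ _ => (0:Int), fun _ _ => "INT0"))).1 i j = 0 :=
    pvBorderA2_zero bl lb _ (pvBorderA1_zero al la _ (fun _ _ => rfl))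
  obtain ⟨hgs, hgb⟩ := pvFillA_inv al bl ru lb _ hz la
  rw [← hSB] at hgs hgb
  have hscore : ∀ j, j ≤ lb → SB.1 la j = pvS al bl ru la j := by
    intro j hj
    rw [hgs la j hj]
    exact if_pos (by omega)
  have hback : ∀ i j, 1 ≤ i → i ≤ la → 1 ≤ j → j ≤ lb → SB.2 i j = pvBT al bl ru i j := by
    intro i j h1 h2 h3 h4
    exact hgb i j h1 h3 h4 (by omega)
  have h0lb : SB.1 0 lb = 0 := by
    rw [hgs 0 lb (le_refl _), if_pos (by omega), pvS_zero_left]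
  rw [h0lb]
  obtain ⟨hb1, hb2, hb3⟩ := pvScanB_eq al bl ru SB.1 la lb hscore (lb+1) (le_refl _)
  set R := (List.range (lb+1)).foldl (pvScanStep SB.1 la) (0, 0) with hR
  -- B side: the row after the fold is pvRowSpec la, and its scan is the take (lb+1) scan
  have hrows : al.foldl (pvRowB bl ru lb) (List.replicate (lb+1) (0, [], []))
      = pvRowSpec al bl ru lb la := by
    have h := pvRowsB al bl ru lb al.length (le_refl _)
    rw [List.take_length] at h
    exact h
  have htake : (pvRowSpec al bl ru lb la).foldl pvPickB ((0:Int), ([]:List Char), ([]:List Char))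
      = ((pvRowSpec al bl ru lb la).take (lb+1)).foldl pvPickB (0, [], []) := by
    have hlen : (pvRowSpec al bl ru lb la).length = lb + 1 := by
      unfold pvRowSpec; simp
    rw [← hlen, List.take_length]
  rw [hrows, htake, hb1]
  -- A side: the traceback from (la, R.2) computes pvAl la R.2
  rw [pvTbA_eq_pvAl al bl ru SB.2 la lb hback (la + R.2) la R.2 (le_refl _) (le_refl _) hb3 [] []]
  simp
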